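-- pv_equiv track=rewrite | github.com/Nickzb2008/analiz | tabs/1tab5_multi_neural_network.py | generate_overall_recommendation
-- ===== SOURCE A (Python) =====
-- def generate_overall_recommendation(signals):
--     """Генерація загальної рекомендації"""
--     strong_buys = len([s for s in signals if s['action'] == 'BUY_STRONG'])
--     weak_buys = len([s for s in signals if s['action'] == 'BUY_WEAK'])
--     sells = len([s for s in signals if s['action'] == 'SELL_STRONG'])
--
--     if strong_buys > 0:
--         return "Сильні покупки - хороша можливість для входу в позиції"
--     elif weak_buys > 0 and sells == 0:
--         return "Слабкі покупки - можна розглянути обережне входження"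
--     elif sells > 0:
--         return "Переважають продажі - рекомендується обережність"
--     else:
--         return "Нейтральний ринок - рекомендується очікування"
-- ===== SOURCE B (Python) =====
-- def generate_overall_recommendation(signals):
--     """Генерація загальної рекомендації"""
--     # Counts are only ever compared with 0, so presence is enough:
--     # one short-circuiting pass with two flags, no counting, no filtering.
--     has_weak = False
--     has_sell = False
--     for s in signals:
--         a = s['action']
--         if a == 'BUY_STRONG':
--             return "Сильні покупки - хороша можливість для входу в позиції"
--         if a == 'BUY_WEAK':
--             has_weak = True
--         elif a == 'SELL_STRONG':
--             has_sell = True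
--     if has_weak and not has_sell:
--         return "Слабкі покупки - можна розглянути обережне входження"
--     if has_sell:
--         return "Переважають продажі - рекомендується обережність"
--     return "Нейтральний ринок - рекомендується очікування"
-- ===== Notes on version B (the rewrite author's own statement) =====
-- stated objective: alternative
-- what changed: B never counts: a single short-circuiting pass tracks only presence flags for BUY_WEAK/SELL_STRONG and returns immediately at the first BUY_STRONG, replacing A's three full filtered scans with length comparisons.
import Mathlib
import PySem

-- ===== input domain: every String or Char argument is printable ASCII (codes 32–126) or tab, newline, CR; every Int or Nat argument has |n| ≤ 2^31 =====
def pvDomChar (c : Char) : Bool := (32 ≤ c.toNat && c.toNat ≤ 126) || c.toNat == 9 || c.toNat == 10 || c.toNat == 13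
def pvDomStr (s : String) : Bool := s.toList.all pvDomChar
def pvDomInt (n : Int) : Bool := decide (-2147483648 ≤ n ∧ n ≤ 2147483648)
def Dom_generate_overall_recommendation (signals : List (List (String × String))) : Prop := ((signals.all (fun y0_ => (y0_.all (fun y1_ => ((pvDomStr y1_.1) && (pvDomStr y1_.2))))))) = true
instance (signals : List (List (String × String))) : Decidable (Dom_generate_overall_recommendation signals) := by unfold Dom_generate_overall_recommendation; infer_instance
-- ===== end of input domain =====

-- B replaces A's three filtered counting scans by one short-circuiting pass with presence flags.
-- ===== PORT A =====
-- s['action'] : first match in the association list; total via default under Pre_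
def pvAct (s : List (String × String)) : String := (PySem.Dict.mk s).getD "action" ""

def generate_overall_recommendation (signals : List (List (String × String))) : String :=
  let strong_buys : Int := (signals.filter (fun s => pvAct s == "BUY_STRONG")).length
  let weak_buys : Int := (signals.filter (fun s => pvAct s == "BUY_WEAK")).length
  let sells : Int := (signals.filter (fun s => pvAct s == "SELL_STRONG")).length
  if strong_buys > 0 then "Сильні покупки - хороша можливість для входу в позиції"
  else if weak_buys > 0 && sells == 0 then "Слабкі покупки - можна розглянути обережне входження"
  else if sells > 0 then "Переважають продажі - рекомендується обережність"
  else "Нейтральний ринок - рекомендується очікування"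

-- ===== PORT B =====
-- the for-loop of Source B: early return on BUY_STRONG, otherwise update the two flags
def pvAltLoop (signals : List (List (String × String))) (has_weak has_sell : Bool) : String :=
  match signals with
  | [] =>
      if has_weak && !has_sell then "Слабкі покупки - можна розглянути обережне входження"
      else if has_sell then "Переважають продажі - рекомендується обережність"
      else "Нейтральний ринок - рекомендується очікування"
  | s :: rest =>
      let a := pvAct s
      if a == "BUY_STRONG" then "Сильні покупки - хороша можливість для входу в позиції"
      else if a == "BUY_WEAK" then pvAltLoop rest true has_sell
      else if a == "SELL_STRONG" then pvAltLoop rest has_weak true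
      else pvAltLoop rest has_weak has_sell

def generate_overall_recommendation_alt (signals : List (List (String × String))) : String :=
  pvAltLoop signals false false

-- ===== PRECONDITION & SPEC =====
-- Pre_ excludes exactly the inputs where some signal lacks the 'action' key, on which Python A raises KeyError.
def Pre_generate_overall_recommendation (signals : List (List (String × String))) : Prop :=
  (signals.all (fun s => s.any (fun p => p.1 == "action"))) = true
instance (signals : List (List (String × String))) : Decidable (Pre_generate_overall_recommendation signals) := by
  unfold Pre_generate_overall_recommendation; infer_instance
def pvWitness_generate_overall_recommendation : (List (List (String × String))) :=
  [[("action", "BUY_WEAK")], [("action", "HOLD")]]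
def Spec_generate_overall_recommendation (signals : List (List (String × String))) (out : String) : Prop := out = generate_overall_recommendation_alt signals
instance (signals : List (List (String × String))) (out : String) : Decidable (Spec_generate_overall_recommendation signals out) := by unfold Spec_generate_overall_recommendation; infer_instance

-- ===== CLAIM (what is proved, stated in full; the proofs are below) =====
def Claim_equal_generate_overall_recommendation : Prop := ∀ (signals : List (List (String × String))), Dom_generate_overall_recommendation signals → Pre_generate_overall_recommendation signals → Spec_generate_overall_recommendation signals (generate_overall_recommendation signals)

-- ===== LEMMAS AND PROOFS =====

-- characterisation of B's loop: its answer is A's decision ladder over the remaining counts,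
-- with the flags standing in for "a matching signal was already seen"
theorem pvAltLoop_spec (signals : List (List (String × String))) (hw hs : Bool) :
    pvAltLoop signals hw hs =
      (if 0 < signals.countP (fun s => pvAct s == "BUY_STRONG") then
        "Сильні покупки - хороша можливість для входу в позиції"
      else if (hw || 0 < signals.countP (fun s => pvAct s == "BUY_WEAK"))
              && !(hs || 0 < signals.countP (fun s => pvAct s == "SELL_STRONG")) then
        "Слабкі покупки - можна розглянути обережне входження"
      else if hs || 0 < signals.countP (fun s => pvAct s == "SELL_STRONG") then
        "Переважають продажі - рекомендується обережність"
      else "Нейтральний ринок - рекомендується очікування") := by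
  induction signals generalizing hw hs with
  | nil => simp [pvAltLoop]
  | cons s rest ih =>
      simp only [pvAltLoop, List.countP_cons, ih]
      by_cases h1 : pvAct s == "BUY_STRONG" <;>
        by_cases h2 : pvAct s == "BUY_WEAK" <;>
          by_cases h3 : pvAct s == "SELL_STRONG" <;>
            (simp_all <;> try split_ifs <;> simp_all)

-- ===== VERDICT (by name: the statement is the Claim_ definition above) =====
theorem generate_overall_recommendation_spec : Claim_equal_generate_overall_recommendation := by
  intro signals _ _
  unfold Spec_generate_overall_recommendation generate_overall_recommendation
    generate_overall_recommendation_alt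
  rw [pvAltLoop_spec]
  simp only [List.countP_eq_length_filter, Bool.false_or]
  split_ifs <;> simp_all <;>
    · obtain ⟨x, hx, he⟩ := ‹∃ x ∈ signals, _›
      first
        | exact ‹∀ x ∈ signals, ¬pvAct x = "SELL_STRONG"› x hx he
        | · obtain ⟨y, hy, hy2⟩ :=
              ‹∀ x ∈ signals, pvAct x = "BUY_WEAK" → ∃ x ∈ signals, pvAct x = "SELL_STRONG"› x hx he
            exact ‹∀ x ∈ signals, ¬pvAct x = "SELL_STRONG"› y hy hy2
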